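-- pv_equiv track=rewrite | github.com/ronanballant/ticket_automation_tool | sps_server_process/sps_data_main.py | prepare_domains
-- ===== SOURCE A (Python) =====
-- def prepare_domains(domains):
--     domain_list = domains.split(",")
--     filtered_list = []
--
--     for x in range(0, len(domain_list)):
--         domain_list[x] = (
--             domain_list[x]
--             .replace("'", "")
--             .replace('"', "")
--             .replace("[", "")
--             .replace("]", "")
--             .replace(" ", "")
--             .replace("/", "")
--             .replace("\\", "")
--             .replace("=", "")
--             .replace("<", "")
--             .replace(">", "")
--             .replace("?", "")
--         )
--
--         filtered_list.append(domain_list[x])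
--
--     return filtered_list
-- ===== SOURCE B (Python) =====
-- def prepare_domains(domains):
--     bad = frozenset("'\"[] /\\=<>?")
--     return ["".join(c for c in piece if c not in bad)
--             for piece in domains.split(",")]
-- ===== Notes on version B (the rewrite author's own statement) =====
-- stated objective: simpler
-- what changed: Replaces the index loop with eleven chained .replace scans per piece by a single character-filter pass per piece against a frozenset of the forbidden characters, built as a list comprehension.
import Mathlib
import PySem

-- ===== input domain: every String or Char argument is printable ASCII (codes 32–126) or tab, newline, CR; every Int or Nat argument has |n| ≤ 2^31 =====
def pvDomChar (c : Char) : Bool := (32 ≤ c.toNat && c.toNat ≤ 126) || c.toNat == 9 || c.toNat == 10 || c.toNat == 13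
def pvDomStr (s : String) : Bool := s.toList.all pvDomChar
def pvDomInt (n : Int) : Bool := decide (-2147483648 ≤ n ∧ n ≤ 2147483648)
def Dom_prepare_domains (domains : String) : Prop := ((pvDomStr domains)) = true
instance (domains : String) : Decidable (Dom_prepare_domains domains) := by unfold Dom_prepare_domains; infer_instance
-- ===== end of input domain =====

-- B replaces A's eleven chained .replace scans per comma piece by one filter pass over a set of forbidden characters (simpler).

-- ===== PORT A =====
-- the chained replaces, innermost applied first, exactly in A's order
def pvCleanA (s : String) : String :=
  PySem.Str.replace (PySem.Str.replace (PySem.Str.replace (PySem.Str.replace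
    (PySem.Str.replace (PySem.Str.replace (PySem.Str.replace (PySem.Str.replace
      (PySem.Str.replace (PySem.Str.replace (PySem.Str.replace s
        "'" "") "\"" "") "[" "") "]" "") " " "") "/" "") "\\" "") "=" "") "<" "") ">" "") "?" ""

def prepare_domains (domains : String) : List String :=
  let domain_list := (PySem.Str.split? domains ",").getD []
  (PySem.List.pyRange 0 (PySem.List.len domain_list) 1).foldl
    (fun acc x => acc ++ [pvCleanA (PySem.List.pyGetD domain_list x "")]) []

-- ===== PORT B =====
def pvBad : List Char := ['\'', '"', '[', ']', ' ', '/', '\\', '=', '<', '>', '?']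

def pvCleanB (s : String) : String :=
  String.ofList (s.toList.filter (fun c => !pvBad.contains c))

def prepare_domains_alt (domains : String) : List String :=
  ((PySem.Str.split? domains ",").getD []).map pvCleanB

-- ===== PRECONDITION & SPEC =====
def Spec_prepare_domains (domains : String) (out : List String) : Prop := out = prepare_domains_alt domains
instance (domains : String) (out : List String) : Decidable (Spec_prepare_domains domains out) := by unfold Spec_prepare_domains; infer_instance

-- ===== CLAIM (what is proved, stated in full; the proofs are below) =====
def Claim_equal_prepare_domains : Prop := ∀ (domains : String), Dom_prepare_domains domains → Spec_prepare_domains domains (prepare_domains domains)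

-- ===== LEMMAS AND PROOFS =====

lemma pvGoOne (c : Char) : ∀ (l : List Char) (fuel : Nat) (acc : List Char), l.length ≤ fuel →
    PySem.Chars.replace.go [c] [] fuel l acc = acc.reverse ++ l.filter (fun x => x != c) := by
  intro l
  induction l with
  | nil => intro fuel acc _; cases fuel <;> simp [PySem.Chars.replace.go]
  | cons x t ih =>
      intro fuel acc h
      cases fuel with
      | zero => simp at h
      | succ n =>
          simp only [PySem.Chars.replace.go, List.isPrefixOf]
          by_cases hx : c = x
          · subst hx
            rw [if_pos (by simp)]
            simp only [List.length_cons, List.length_nil, List.drop_succ_cons,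
              List.drop_zero, List.reverse_nil, List.nil_append]
            rw [ih n acc (by simpa using h)]
            simp
          · rw [if_neg (by simp [hx])]
            rw [ih n (x :: acc) (by simpa using h)]
            have hxc : (x != c) = true := by simp [bne_iff_ne]; exact fun e => hx e.symm
            simp [hxc]
  
lemma pvReplaceOne (c : Char) (cs : List Char) :
    PySem.Chars.replace cs [c] [] = cs.filter (fun x => x != c) := by
  rw [PySem.Chars.replace]
  simp only [List.isEmpty]
  exact pvGoOne c cs cs.length [] le_rfl

lemma pvClean_eq (s : String) : pvCleanA s = pvCleanB s := by
  rw [← String.toList_inj]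
  simp only [pvCleanA, pvCleanB, PySem.Str.toList_replace]
  rw [show ("'" : String).toList = ['\''] from rfl,
      show ("\"" : String).toList = ['"'] from rfl,
      show ("[" : String).toList = ['['] from rfl,
      show ("]" : String).toList = [']'] from rfl,
      show (" " : String).toList = [' '] from rfl,
      show ("/" : String).toList = ['/'] from rfl,
      show ("\\" : String).toList = ['\\'] from rfl,
      show ("=" : String).toList = ['='] from rfl,
      show ("<" : String).toList = ['<'] from rfl,
      show (">" : String).toList = ['>'] from rfl,
      show ("?" : String).toList = ['?'] from rfl,
      show ("" : String).toList = [] from rfl]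
  simp only [pvReplaceOne, List.filter_filter]
  rw [String.toList_ofList]
  apply List.filter_congr
  intro x _
  simp only [pvBad, List.contains_cons, List.contains_nil, Bool.or_false, Bool.not_or]
  simp only [bne]
  ac_rfl

-- ===== VERDICT (by name: the statement is the Claim_ definition above) =====
theorem prepare_domains_spec : Claim_equal_prepare_domains := by
  intro domains _
  unfold Spec_prepare_domains prepare_domains prepare_domains_alt
  rw [PySem.List.foldl_pyRange_zero_pyGetD _ "" (fun acc v => acc ++ [pvCleanA v]) []]
  rw [PySem.List.foldl_append_singleton_eq_map]
  simp [pvClean_eq]
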